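-- pv_equiv track=rewrite | github.com/slhleosun/reasoning-trajectory | scripts/predictors/visualize_linear_probe_results.py | organize_results_by_target
-- ===== SOURCE A (Python) =====
-- from typing import Dict, List, Tuple
-- from collections import defaultdict
--
-- def organize_results_by_target(results: List[Dict]) -> Dict[str, List[Dict]]:
--     """Organize results by target (step_1, step_2, ..., hash)
--
--     Args:
--         results: List of result dictionaries
--
--     Returns:
--         Dict mapping target -> list of results for that target
--     """
--     by_target = defaultdict(list)
--     for result in results:
--         target = result['target']
--         by_target[target].append(result)
--
--     # Sort each target's results by layer_idx
--     for target in by_target: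
--         by_target[target] = sorted(by_target[target], key=lambda r: r['layer_idx'])
--
--     return dict(by_target)
-- ===== SOURCE B (Python) =====
-- def organize_results_by_target(results):
--     """Organize results by target: one global stable sort by layer_idx, then a
--     single grouping pass (keys pre-seeded in first-appearance order)."""
--     by_target = {r['target']: [] for r in results}
--     for r in sorted(results, key=lambda x: x['layer_idx']):
--         by_target[r['target']].append(r)
--     return by_target
-- ===== Notes on version B (the rewrite author's own statement) =====
-- stated objective: alternative
-- what changed: A groups first and then sorts each group separately; B performs one global stable sort by layer_idx and then a single grouping pass into pre-seeded keys, so the per-group sorts disappear.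
import Mathlib
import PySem

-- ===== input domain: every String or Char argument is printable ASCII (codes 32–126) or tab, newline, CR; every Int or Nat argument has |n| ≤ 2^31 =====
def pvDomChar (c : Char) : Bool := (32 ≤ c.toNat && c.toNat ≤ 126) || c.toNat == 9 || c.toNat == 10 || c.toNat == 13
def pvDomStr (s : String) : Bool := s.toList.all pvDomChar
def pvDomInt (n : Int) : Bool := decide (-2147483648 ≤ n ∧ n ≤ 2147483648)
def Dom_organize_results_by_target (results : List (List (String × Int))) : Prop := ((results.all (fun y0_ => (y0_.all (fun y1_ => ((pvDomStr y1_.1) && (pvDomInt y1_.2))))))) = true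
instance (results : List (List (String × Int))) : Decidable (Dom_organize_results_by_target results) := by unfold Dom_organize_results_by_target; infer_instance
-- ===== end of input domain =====

-- B replaces A's group-then-sort-each-group by one global stable sort followed by a single
-- grouping pass into pre-seeded keys (objective: alternative decomposition, same cost).

-- ===== PORT A =====
-- r['target'] / r['layer_idx'] on the result dict r; Pre_ guarantees the key is present,
-- so getD's default 0 is never reached on admitted inputs (Python raises KeyError there).
def pyTargetOf (r : List (String × Int)) : Int := (PySem.Dict.mk r).getD "target" 0
def pyLayerOf (r : List (String × Int)) : Int := (PySem.Dict.mk r).getD "layer_idx" 0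

def organize_results_by_target (results : List (List (String × Int))) : List (Int × List (List (String × Int))) :=
  -- by_target = defaultdict(list); for result in results: by_target[result['target']].append(result)
  let by_target : PySem.Dict Int (List (List (String × Int))) :=
    results.foldl (fun d r => d.modify (pyTargetOf r) [] (fun v => v ++ [r])) PySem.Dict.empty
  -- for target in by_target: by_target[target] = sorted(by_target[target], key=lambda r: r['layer_idx'])
  let by_target2 : PySem.Dict Int (List (List (String × Int))) :=
    by_target.keys.foldl (fun d t => d.insert t (PySem.List.sorted (d.getD t []) pyLayerOf)) by_target
  by_target2.items

-- ===== PORT B =====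
def organize_results_by_target_alt (results : List (List (String × Int))) : List (Int × List (List (String × Int))) :=
  -- by_target = {r['target']: [] for r in results}
  let by_target : PySem.Dict Int (List (List (String × Int))) :=
    results.foldl (fun d r => d.insert (pyTargetOf r) []) PySem.Dict.empty
  -- for r in sorted(results, key=lambda x: x['layer_idx']): by_target[r['target']].append(r)
  let filled : PySem.Dict Int (List (List (String × Int))) :=
    (PySem.List.sorted results pyLayerOf).foldl
      (fun d r => d.modify (pyTargetOf r) [] (fun v => v ++ [r])) by_target
  filled.items

-- ===== PRECONDITION & SPEC =====
-- Pre_ excludes exactly the inputs on which Python A raises KeyError: a result dict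
-- missing the 'target' or 'layer_idx' key (B raises there too).
def Pre_organize_results_by_target (results : List (List (String × Int))) : Prop :=
  (results.all (fun r => (PySem.Dict.mk r).contains "target" && (PySem.Dict.mk r).contains "layer_idx")) = true
instance (results : List (List (String × Int))) : Decidable (Pre_organize_results_by_target results) := by unfold Pre_organize_results_by_target; infer_instance

def pvWitness_organize_results_by_target : (List (List (String × Int))) :=
  [[("target", 1), ("layer_idx", 0)], [("target", 2), ("layer_idx", 3)]]

def Spec_organize_results_by_target (results : List (List (String × Int))) (out : List (Int × List (List (String × Int)))) : Prop := out = organize_results_by_target_alt results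
instance (results : List (List (String × Int))) (out : List (Int × List (List (String × Int)))) : Decidable (Spec_organize_results_by_target results out) := by unfold Spec_organize_results_by_target; infer_instance

-- ===== CLAIM (what is proved, stated in full; the proofs are below) =====
def Claim_equal_organize_results_by_target : Prop := ∀ (results : List (List (String × Int))), Dom_organize_results_by_target results → Pre_organize_results_by_target results → Spec_organize_results_by_target results (organize_results_by_target results)

-- ===== LEMMAS AND PROOFS =====

-- Set.update adds nothing when every element is already present.
theorem pv_set_update_self {α : Type} [BEq α] [LawfulBEq α] (l : List α) (s : PySem.Set α)
    (h : ∀ x ∈ l, x ∈ s) : PySem.Set.update s l = s := by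
  induction l generalizing s with
  | nil => rfl
  | cons x t ih =>
      have hx : PySem.Set.add s x = s := by
        simp [PySem.Set.add, PySem.Set.contains, h x (by simp)]
      show PySem.Set.update (PySem.Set.add s x) t = s
      rw [hx]
      exact ih s (fun y hy => h y (by simp [hy]))

-- the grouping loop: value at c is the start value extended by the matching inputs in order
theorem pv_groupFold_getD (l : List (List (String × Int)))
    (d : PySem.Dict Int (List (List (String × Int)))) (c : Int) :
    (l.foldl (fun d r => d.modify (pyTargetOf r) [] (fun v => v ++ [r])) d).getD c []
      = d.getD c [] ++ l.filter (fun r => pyTargetOf r == c) := by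
  have h := PySem.Dict.getD_foldl_modify_append (l.map (fun r => (pyTargetOf r, r))) d c
  rw [List.foldl_map] at h
  simpa [List.filter_map, Function.comp_def] using h

-- the seeding loop of B only writes []: every value stays []
theorem pv_seedFold_getD (l : List (List (String × Int)))
    (d : PySem.Dict Int (List (List (String × Int)))) (c : Int)
    (h : d.getD c [] = []) :
    (l.foldl (fun d r => d.insert (pyTargetOf r) ([] : List (List (String × Int)))) d).getD c [] = [] := by
  induction l generalizing d with
  | nil => exact h
  | cons x t ih =>
      exact ih _ (by rw [PySem.Dict.getD_insert]; split <;> simp [h])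

-- inserting an element smaller than everything in the list puts it in front
theorem pv_insertBy_head_lt {α : Type} (key : α → Int) (x : α) (l : List α)
    (h : ∀ b ∈ l, key x < key b) :
    PySem.List.insertBy (fun a b => decide (key a < key b)) x l = x :: l := by
  cases l with
  | nil => rfl
  | cons b t => simp [PySem.List.insertBy, h b (by simp)]

-- filtering commutes with a stable insertion into a key-sorted list
theorem pv_filter_insertBy {α : Type} (key : α → Int) (p : α → Bool) (x : α) (l : List α)
    (h : l.Pairwise (fun a b => key a ≤ key b)) :
    (PySem.List.insertBy (fun a b => decide (key a < key b)) x l).filter p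
      = if p x then PySem.List.insertBy (fun a b => decide (key a < key b)) x (l.filter p)
        else l.filter p := by
  induction l with
  | nil => by_cases hpx : p x <;> simp [PySem.List.insertBy, hpx]
  | cons y t ih =>
      rcases List.pairwise_cons.mp h with ⟨hy, ht⟩
      by_cases hlt : key x < key y
      · have hall : ∀ b ∈ (y :: t).filter p, key x < key b := by
          intro b hb
          rcases List.mem_filter.mp hb with ⟨hb, _⟩
          rcases List.mem_cons.mp hb with rfl | hb
          · exact hlt
          · exact lt_of_lt_of_le hlt (hy b hb)
        rw [show PySem.List.insertBy (fun a b => decide (key a < key b)) x (y :: t)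
              = x :: y :: t by simp [PySem.List.insertBy, hlt]]
        rw [pv_insertBy_head_lt key x _ hall]
        by_cases hpx : p x <;> simp [hpx, List.filter_cons]
      · rw [show PySem.List.insertBy (fun a b => decide (key a < key b)) x (y :: t)
              = y :: PySem.List.insertBy (fun a b => decide (key a < key b)) x t by
                simp [PySem.List.insertBy, hlt]]
        by_cases hpy : p y
        · simp only [List.filter_cons, hpy, if_pos]
          rw [ih ht]
          by_cases hpx : p x
          · simp only [hpx, ite_true]
            rw [show PySem.List.insertBy (fun a b => decide (key a < key b)) x (y :: t.filter p)
                  = y :: PySem.List.insertBy (fun a b => decide (key a < key b)) x (t.filter p) by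
                    simp [PySem.List.insertBy, hlt]]
          · simp [hpx]
        · simp only [List.filter_cons, hpy, ite_false, Bool.false_eq_true]
          rw [ih ht]

-- filtering commutes with the stable sort
theorem pv_filter_sorted {α : Type} (key : α → Int) (p : α → Bool) (xs : List α) :
    (PySem.List.sorted xs key).filter p = PySem.List.sorted (xs.filter p) key := by
  induction xs using List.reverseRecOn with
  | nil => simp [PySem.List.sorted_eq_foldl_insertBy]
  | append_singleton xs x ih =>
      rw [PySem.List.sorted_eq_foldl_insertBy (xs ++ [x]) key, List.foldl_append,
        ← PySem.List.sorted_eq_foldl_insertBy xs key]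
      simp only [List.foldl_cons, List.foldl_nil]
      rw [pv_filter_insertBy key p x _ (PySem.List.sorted_pairwise xs key), ih]
      by_cases hpx : p x
      · rw [List.filter_append, show List.filter p [x] = [x] by simp [hpx]]
        rw [PySem.List.sorted_eq_foldl_insertBy (xs.filter p ++ [x]) key, List.foldl_append,
          ← PySem.List.sorted_eq_foldl_insertBy (xs.filter p) key]
        simp [hpx]
      · rw [List.filter_append, show List.filter p [x] = [] by simp [hpx]]
        simp [hpx]

-- A's second loop: each key updated once, reading the original value
theorem pv_sortLoop_getD (ks : List Int) (hnd : ks.Nodup)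
    (d : PySem.Dict Int (List (List (String × Int)))) (u : Int) :
    (ks.foldl (fun d t => d.insert t (PySem.List.sorted (d.getD t []) pyLayerOf)) d).getD u []
      = if u ∈ ks then PySem.List.sorted (d.getD u []) pyLayerOf else d.getD u [] := by
  induction ks generalizing d with
  | nil => simp
  | cons k t ih =>
      rcases List.nodup_cons.mp hnd with ⟨hk, ht⟩
      simp only [List.foldl_cons]
      rw [ih ht]
      by_cases hu : u ∈ t
      · have : u ≠ k := fun h => hk (h ▸ hu)
        simp [hu, this, PySem.Dict.getD_insert, List.mem_cons]
      · by_cases huk : u = k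
        · subst huk; simp [hu]
        · simp [hu, huk, PySem.Dict.getD_insert, List.mem_cons]

-- ===== VERDICT (by name: the statement is the Claim_ definition above) =====
theorem organize_results_by_target_spec : Claim_equal_organize_results_by_target := by
  intro results _ _
  show organize_results_by_target results = organize_results_by_target_alt results
  unfold organize_results_by_target organize_results_by_target_alt
  -- names for the four intermediate dicts
  set d1 : PySem.Dict Int (List (List (String × Int))) :=
    results.foldl (fun d r => d.modify (pyTargetOf r) [] (fun v => v ++ [r])) PySem.Dict.empty with hd1
  set b1 : PySem.Dict Int (List (List (String × Int))) :=
    results.foldl (fun d r => d.insert (pyTargetOf r) []) PySem.Dict.empty with hb1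
  set d2 : PySem.Dict Int (List (List (String × Int))) :=
    d1.keys.foldl (fun d t => d.insert t (PySem.List.sorted (d.getD t []) pyLayerOf)) d1 with hd2
  set b2 : PySem.Dict Int (List (List (String × Int))) :=
    (PySem.List.sorted results pyLayerOf).foldl
      (fun d r => d.modify (pyTargetOf r) [] (fun v => v ++ [r])) b1 with hb2
  -- keys of the grouping dicts: first-occurrence dedup of the targets
  have hk1 : d1.keys = PySem.Set.ofList (results.map pyTargetOf) := by
    rw [hd1, PySem.Dict.keys_foldl_modify_key results pyTargetOf [] (fun _ r v => v ++ [r])]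
    simp [PySem.Set.ofList_eq_foldl, PySem.Set.update]
  have hkb1 : b1.keys = PySem.Set.ofList (results.map pyTargetOf) := by
    rw [hb1, PySem.Dict.keys_foldl_insert_key results pyTargetOf (fun _ _ => [])]
    simp [PySem.Set.ofList_eq_foldl, PySem.Set.update]
  have hnd1 : d1.keys.Nodup := by
    rw [hk1]; exact PySem.Set.nodup_ofList _
  have hk2 : d2.keys = d1.keys := by
    rw [hd2]
    have := PySem.Dict.keys_foldl_insert_key d1.keys (fun t => t)
      (fun d t => PySem.List.sorted (d.getD t []) pyLayerOf) d1
    simp only [List.map_id_fun', id] at this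
    rw [this]
    exact pv_set_update_self _ _ (fun x hx => hx)
  have hkb2 : b2.keys = b1.keys := by
    rw [hb2, PySem.Dict.keys_foldl_modify_key _ pyTargetOf [] (fun _ r v => v ++ [r])]
    refine pv_set_update_self _ _ (fun x hx => ?_)
    rw [hkb1]
    rcases List.mem_map.mp hx with ⟨r, hr, rfl⟩
    simp only [PySem.List.mem_sorted] at hr
    exact (PySem.Set.mem_ofList _ _).mpr (List.mem_map.mpr ⟨r, hr, rfl⟩)
  have hnd2 : d2.keys.Nodup := hk2 ▸ hnd1
  have hndb2 : b2.keys.Nodup := by rw [hkb2, hkb1]; exact PySem.Set.nodup_ofList _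
  -- items via keys and lookups
  rw [PySem.Dict.items_eq_map_keys d2 hnd2 [], PySem.Dict.items_eq_map_keys b2 hndb2 []]
  rw [hk2, hkb2, hkb1, ← hk1]
  refine List.map_congr_left (fun k hk => ?_)
  have hvd : d2.getD k [] = PySem.List.sorted (d1.getD k []) pyLayerOf := by
    rw [hd2, pv_sortLoop_getD d1.keys hnd1 d1 k, if_pos hk]
  have hvd1 : d1.getD k [] = results.filter (fun r => pyTargetOf r == k) := by
    rw [hd1, pv_groupFold_getD]; simp
  have hvb : b2.getD k [] =
      (PySem.List.sorted results pyLayerOf).filter (fun r => pyTargetOf r == k) := by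
    rw [hb2, pv_groupFold_getD]
    rw [pv_seedFold_getD results PySem.Dict.empty k (by simp)]
    simp
  rw [hvd, hvd1, hvb, pv_filter_sorted]
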